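-- pv_equiv track=rewrite | github.com/ywfan617/python- | pintia/第3章-13 字符串替换.py | f
-- ===== SOURCE A (Python) =====
-- def f(strs):
--     n=len(strs)
--     res=""
--     for i in range(n):
--         if "A"<=strs[i]<="Z":
--             res+=chr(90-(ord(strs[i])-65))
--         else:
--             res+=strs[i]
--     return res
-- ===== SOURCE B (Python) =====
-- def f(strs):
--     # Divide and conquer: split the string in half, mirror each half
--     # recursively, base case mirrors a single character arithmetically.
--     if len(strs) <= 1:
--         if strs and 65 <= ord(strs) <= 90:
--             return chr(155 - ord(strs))
--         return strs
--     m = len(strs) // 2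
--     return f(strs[:m]) + f(strs[m:])
-- ===== Notes on version B (the rewrite author's own statement) =====
-- stated objective: alternative
-- what changed: Replaces the index loop with string concatenation by a divide-and-conquer recursion that splits the string in half and mirrors a single character arithmetically (chr(155-ord(c))) at the base case.
import Mathlib
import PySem

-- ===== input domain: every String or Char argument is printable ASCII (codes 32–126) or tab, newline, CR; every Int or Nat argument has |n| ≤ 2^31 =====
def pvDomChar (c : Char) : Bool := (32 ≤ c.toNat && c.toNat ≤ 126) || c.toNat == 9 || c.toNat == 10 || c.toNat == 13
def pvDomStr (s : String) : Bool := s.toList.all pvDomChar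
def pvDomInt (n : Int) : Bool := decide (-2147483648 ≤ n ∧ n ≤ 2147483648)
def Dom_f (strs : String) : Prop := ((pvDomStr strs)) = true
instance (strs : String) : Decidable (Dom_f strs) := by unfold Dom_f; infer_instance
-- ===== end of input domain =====

-- B replaces A's index loop with a divide-and-conquer recursion (split at the midpoint,
-- mirror a single character arithmetically at the base case); objective: alternative.


-- ===== PORT A =====
-- literal port of A: loop over indices, branch on uppercase, append char by char
def f (strs : String) : String :=
  let n : Int := PySem.Str.len strs
  let res : List Char := (PySem.List.pyRange 0 n 1).foldl
    (fun res i =>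
      match PySem.List.pyGet? strs.toList i with
      | some c =>
          if 'A' ≤ c ∧ c ≤ 'Z' then res ++ [Char.ofNat (90 - (c.toNat - 65))]
          else res ++ [c]
      | none => res) []  -- none is unreachable: i ranges over 0..n-1
  String.ofList res

-- ===== PORT B =====
-- divide-and-conquer on the character list: strs[:m] / strs[m:] are take/drop at m = len//2
def fAltList (cs : List Char) : List Char :=
  if cs.length ≤ 1 then
    match cs with
    | [c] => if 65 ≤ c.toNat ∧ c.toNat ≤ 90 then [Char.ofNat (155 - c.toNat)] else [c]
    | _ => cs
  else
    fAltList (cs.take (cs.length / 2)) ++ fAltList (cs.drop (cs.length / 2))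
termination_by cs.length
decreasing_by
  · simp only [List.length_take]; omega
  · simp only [List.length_drop]; omega

def f_alt (strs : String) : String := String.ofList (fAltList strs.toList)

-- ===== PRECONDITION & SPEC =====
def Spec_f (strs : String) (out : String) : Prop := out = f_alt strs
instance (strs : String) (out : String) : Decidable (Spec_f strs out) := by unfold Spec_f; infer_instance

-- ===== CLAIM (what is proved, stated in full; the proofs are below) =====
def Claim_equal_f : Prop := ∀ (strs : String), Dom_f strs → Spec_f strs (f strs)

-- ===== LEMMAS AND PROOFS =====

-- the common per-character mapping
def pvG (c : Char) : Char :=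
  if 'A' ≤ c ∧ c ≤ 'Z' then Char.ofNat (90 - (c.toNat - 65)) else c

-- B's recursion computes the pointwise map
-- the Python comparison "A" <= c <= "Z" is the ord comparison 65 <= ord(c) <= 90
theorem upper_iff (c : Char) : ('A' ≤ c ∧ c ≤ 'Z') ↔ (65 ≤ c.toNat ∧ c.toNat ≤ 90) := by
  rw [Char.le_def, Char.le_def, UInt32.le_iff_toNat_le, UInt32.le_iff_toNat_le]
  have h : c.toNat = c.val.toNat := rfl
  rw [h, show ('A'.val.toNat) = 65 from rfl, show ('Z'.val.toNat) = 90 from rfl]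

-- B's recursion computes the pointwise map
theorem fAltList_eq_map (cs : List Char) : fAltList cs = cs.map pvG := by
  fun_induction fAltList cs with
  | case1 c hc h =>
      simp [pvG, (upper_iff c).2 hc, show 90 - (c.toNat - 65) = 155 - c.toNat by omega]
  | case2 c hc h =>
      simp [pvG, (upper_iff c).not.2 hc]
  | case3 cs h h2 =>
      have : cs = [] := by
        cases cs with
        | nil => rfl
        | cons a t => cases t with
          | nil => exact absurd rfl (h2 a)
          | cons b u => simp at h
      simp [this]
  | case4 cs h ih1 ih2 =>
      rw [ih1, ih2, ← List.map_append, List.take_append_drop]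

-- A's loop, restated as a fold over the character list
theorem f_fold (strs : String) :
    f strs = String.ofList (strs.toList.foldl
      (fun res c =>
        if 'A' ≤ c ∧ c ≤ 'Z' then res ++ [Char.ofNat (90 - (c.toNat - 65))]
        else res ++ [c]) []) := by
  have hf : f strs = String.ofList ((PySem.List.pyRange 0 (PySem.Str.len strs) 1).foldl
      (fun res i =>
        match PySem.List.pyGet? strs.toList i with
        | some c =>
            if 'A' ≤ c ∧ c ≤ 'Z' then res ++ [Char.ofNat (90 - (c.toNat - 65))]
            else res ++ [c]
        | none => res) []) := rfl
  rw [hf]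
  congr 1
  rw [PySem.List.foldl_congr_mem _ _
      (fun res i =>
        (fun res c => if 'A' ≤ c ∧ c ≤ 'Z' then res ++ [Char.ofNat (90 - (c.toNat - 65))]
         else res ++ [c]) res (PySem.List.pyGetD strs.toList i 'a')) _
      (by
        intro a i hi
        have hmem := (PySem.List.mem_pyRange_one).1 hi
        have h0 : (0:Int) ≤ i := hmem.1
        have hlt : i < (strs.toList.length : Int) := by
          simpa [PySem.Str.len_eq] using hmem.2
        have hnat : i.toNat < strs.toList.length := by omega
        simp [PySem.List.pyGet?_of_nonneg _ h0, PySem.List.pyGetD_of_nonneg _ 'a' h0,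
              List.getElem?_eq_getElem hnat, List.getD])]
  rw [PySem.Str.len_eq]
  exact PySem.List.foldl_pyRange_zero_pyGetD' strs.toList 'a'
    (fun res c => if 'A' ≤ c ∧ c ≤ 'Z' then res ++ [Char.ofNat (90 - (c.toNat - 65))]
     else res ++ [c]) []

-- appending-singleton fold is map
theorem foldl_append_singleton_eq_map (g : Char → Char) (cs : List Char) (acc : List Char) :
    cs.foldl (fun res c => res ++ [g c]) acc = acc ++ cs.map g := by
  induction cs generalizing acc with
  | nil => simp
  | cons c cs ih => simp [ih]

-- ===== VERDICT (by name: the statement is the Claim_ definition above) =====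
theorem f_spec : Claim_equal_f := by
  intro strs _
  unfold Spec_f f_alt
  rw [f_fold, fAltList_eq_map]
  congr 1
  rw [show (fun (res : List Char) (c : Char) =>
        if 'A' ≤ c ∧ c ≤ 'Z' then res ++ [Char.ofNat (90 - (c.toNat - 65))]
        else res ++ [c]) =
      (fun (res : List Char) (c : Char) => res ++ [pvG c]) from by
        funext res c; unfold pvG; split <;> rfl]
  exact foldl_append_singleton_eq_map _ _ []
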